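-- pv_equiv track=rewrite | github.com/witoldzol/advent-of-code-2024 | d12.py | deduplicate_edges
-- ===== SOURCE A (Python) =====
-- from typing import Tuple
--
-- XYCoords = Tuple[int, int]
--
-- def deduplicate_edges(
--     edges: list[tuple[XYCoords, set[XYCoords]]],
-- ) -> dict[tuple[XYCoords], list[set[XYCoords]]]:
--     deduplicated_direction_to_edges = {}
--     direction_to_edge: dict[XYCoords, list[set[XYCoords]]] = {}
--     for edge in edges:
--         direction = edge[0]
--         set_of_coords = edge[1]
--         if direction in direction_to_edge:
--             direction_to_edge[direction].append(set_of_coords)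
--         else:
--             direction_to_edge[direction] = [set_of_coords]
--     # we need to sort by lenght first because, logically, a shorter set cannot be a superset of a longer one
--     for direction, list_of_sets_of_coords in direction_to_edge.items():
--         sorted_coords = sorted(
--             list_of_sets_of_coords, key=lambda x: len(x), reverse=True
--         )
--         for sc in sorted_coords:
--             if direction in deduplicated_direction_to_edges:
--                 if any(
--                     sc.issubset(set_of_coords)
--                     for set_of_coords in deduplicated_direction_to_edges[direction]
--                 ):
--                     continue
--                 else:
--                     deduplicated_direction_to_edges[direction].append(sc)
--             else:
--                 deduplicated_direction_to_edges[direction] = [sc]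
--     return deduplicated_direction_to_edges
-- ===== SOURCE B (Python) =====
-- def deduplicate_edges(edges):
--     groups = {}
--     for direction, coords in edges:
--         groups.setdefault(direction, []).append(coords)
--     result = {}
--     for direction, group in groups.items():
--         survivors = []
--         for i, s in enumerate(group):
--             redundant = any(
--                 j != i and s <= t and (len(t) > len(s) or (len(t) == len(s) and j < i))
--                 for j, t in enumerate(group)
--             )
--             if not redundant:
--                 survivors.append(s)
--         result[direction] = sorted(survivors, key=len, reverse=True)
--     return result
-- ===== Notes on version B (the rewrite author's own statement) =====
-- stated objective: alternative
-- what changed: Instead of A's sort-first-then-greedy-filter-against-the-kept-list per direction, B decides redundancy by a direct global pairwise test on the unsorted group (a set is dropped iff some other set is a proper superset, or an equal set occurs earlier), collects survivors in insertion order, and only then does one stable length-descending sort.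
import Mathlib
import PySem

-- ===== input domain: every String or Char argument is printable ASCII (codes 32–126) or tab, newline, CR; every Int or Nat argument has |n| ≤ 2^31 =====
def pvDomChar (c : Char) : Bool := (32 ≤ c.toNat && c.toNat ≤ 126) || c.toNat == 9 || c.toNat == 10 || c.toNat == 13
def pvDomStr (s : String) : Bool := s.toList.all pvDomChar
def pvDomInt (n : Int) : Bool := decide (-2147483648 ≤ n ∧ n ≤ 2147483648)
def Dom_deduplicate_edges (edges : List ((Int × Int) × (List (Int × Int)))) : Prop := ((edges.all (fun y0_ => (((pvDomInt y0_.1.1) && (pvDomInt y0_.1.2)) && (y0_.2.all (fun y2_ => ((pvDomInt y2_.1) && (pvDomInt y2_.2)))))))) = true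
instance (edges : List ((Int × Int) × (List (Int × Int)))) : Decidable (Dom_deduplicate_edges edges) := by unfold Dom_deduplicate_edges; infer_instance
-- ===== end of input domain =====

-- B replaces A's sort-then-greedy-filter per direction by a global pairwise redundancy test on the
-- unsorted group followed by a single final stable sort (objective: alternative decomposition).

-- ===== PORT A =====
-- literal transliteration of A: group by direction (contains/append/insert), then for each
-- direction sort by len descending and greedily keep sets not contained in an already-kept set,
-- threading the result dict through both loops.
def deduplicate_edges (edges : List ((Int × Int) × (List (Int × Int)))) : List (Int × Int × List (List (Int × Int))) :=
  let g := edges.foldl (fun d e =>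
      if d.contains e.1 then PySem.Dict.modify d e.1 [] (fun l => l ++ [e.2])
      else PySem.Dict.insert d e.1 [e.2]) PySem.Dict.empty
  let out := g.items.foldl (fun out p =>
      (PySem.List.sorted p.2 (fun x => PySem.Set.len x) true).foldl (fun out sc =>
        if out.contains p.1 then
          if (PySem.Dict.getD out p.1 []).any (fun t => PySem.Set.issubset sc t) then out
          else PySem.Dict.modify out p.1 [] (fun l => l ++ [sc])
        else PySem.Dict.insert out p.1 [sc]) out) PySem.Dict.empty
  out.items.map (fun p => (p.1.1, p.1.2, p.2))

-- ===== PORT B =====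
-- the generator's condition 'j != i and s <= t and (len(t) > len(s) or (len(t) == len(s) and j < i))'
-- for q = (i, s), r = (j, t), named so the proofs can cite it
def pvBad (q r : Int × List (Int × Int)) : Bool :=
  (r.1 != q.1) && PySem.Set.issubset q.2 r.2 &&
    (decide (PySem.Set.len q.2 < PySem.Set.len r.2) ||
     (PySem.Set.len r.2 == PySem.Set.len q.2 && decide (r.1 < q.1)))

-- literal transliteration of B: groups.setdefault(direction, []).append(coords) is the dict
-- update d[k] = d.get(k, []) + [coords] (= Dict.modify); per direction, the inner loop over
-- enumerate(group) appends s to survivors unless the any(...) over enumerate(group) holds,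
-- and the dict stores sorted(survivors, key=len, reverse=True).
def deduplicate_edges_alt (edges : List ((Int × Int) × (List (Int × Int)))) : List (Int × Int × List (List (Int × Int))) :=
  let groups := edges.foldl (fun d e => PySem.Dict.modify d e.1 [] (fun l => l ++ [e.2])) PySem.Dict.empty
  let result := groups.items.foldl (fun out p =>
      let survivors := (PySem.List.enumerate p.2).foldl (fun acc q =>
          if (PySem.List.enumerate p.2).any (fun r => pvBad q r) then acc else acc ++ [q.2]) []
      PySem.Dict.insert out p.1 (PySem.List.sorted survivors (fun x => PySem.Set.len x) true)) PySem.Dict.empty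
  result.items.map (fun p => (p.1.1, p.1.2, p.2))

-- ===== PRECONDITION & SPEC =====
def Spec_deduplicate_edges (edges : List ((Int × Int) × (List (Int × Int)))) (out : List (Int × Int × List (List (Int × Int)))) : Prop := out = deduplicate_edges_alt edges
instance (edges : List ((Int × Int) × (List (Int × Int)))) (out : List (Int × Int × List (List (Int × Int)))) : Decidable (Spec_deduplicate_edges edges out) := by unfold Spec_deduplicate_edges; infer_instance

-- ===== CLAIM (what is proved, stated in full; the proofs are below) =====
def Claim_equal_deduplicate_edges : Prop := ∀ (edges : List ((Int × Int) × (List (Int × Int)))), Dom_deduplicate_edges edges → Spec_deduplicate_edges edges (deduplicate_edges edges)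

-- ===== LEMMAS AND PROOFS =====

-- A's greedy loop body, as a pure function of the kept accumulator.
def pvGre (acc : List (List (Int × Int))) : List (List (Int × Int)) → List (List (Int × Int))
  | [] => acc
  | s :: r => if acc.any (fun t => PySem.Set.issubset s t) then pvGre acc r
              else pvGre (acc ++ [s]) r

-- the part pvGre appends to acc (kept-only context)
def pvPfk (ctx : List (List (Int × Int))) : List (List (Int × Int)) → List (List (Int × Int))
  | [] => []
  | s :: r => if ctx.any (fun t => PySem.Set.issubset s t) then pvPfk ctx r
              else s :: pvPfk (ctx ++ [s]) r

-- prefix filter: drop s iff some element of the FULL prefix contains it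
def pvPfa (ctx : List (List (Int × Int))) : List (List (Int × Int)) → List (List (Int × Int))
  | [] => []
  | s :: r => if ctx.any (fun t => PySem.Set.issubset s t) then pvPfa (ctx ++ [s]) r
              else s :: pvPfa (ctx ++ [s]) r

lemma pvSub_trans {a b c : List (Int × Int)} (h1 : PySem.Set.issubset a b = true)
    (h2 : PySem.Set.issubset b c = true) : PySem.Set.issubset a c = true := by
  rw [PySem.Set.issubset_iff] at *
  exact fun x hx => h2 x (h1 x hx)

lemma pvGre_eq (ys : List (List (Int × Int))) : ∀ acc, pvGre acc ys = acc ++ pvPfk acc ys := by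
  induction ys with
  | nil => intro acc; simp [pvGre, pvPfk]
  | cons s r ih =>
    intro acc
    by_cases h : acc.any (fun t => PySem.Set.issubset s t) = true
    · simp [pvGre, pvPfk, h, ih]
    · simp [pvGre, pvPfk, h, ih]

lemma pvPfk_eq_pfa (ys : List (List (Int × Int))) : ∀ ckept call,
    (∀ s, call.any (fun t => PySem.Set.issubset s t) = ckept.any (fun t => PySem.Set.issubset s t)) →
    pvPfk ckept ys = pvPfa call ys := by
  induction ys with
  | nil => intro _ _ _; simp [pvPfk, pvPfa]
  | cons s r ih =>
    intro ckept call h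
    by_cases hs : ckept.any (fun t => PySem.Set.issubset s t) = true
    · simp only [pvPfk, pvPfa, h s, hs, if_true]
      apply ih
      intro u
      rw [List.any_append, h u]
      simp only [List.any_cons, List.any_nil, Bool.or_false]
      cases hu : PySem.Set.issubset u s with
      | false => simp
      | true =>
        simp only [Bool.or_true]
        rw [List.any_eq_true] at hs
        obtain ⟨c, hc, hsc⟩ := hs
        have hk : ckept.any (fun t => PySem.Set.issubset u t) = true := by
          rw [List.any_eq_true]; exact ⟨c, hc, pvSub_trans hu hsc⟩
        exact hk.symm
    · have hs' : ckept.any (fun t => PySem.Set.issubset s t) = false := eq_false_of_ne_true hs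
      simp only [pvPfk, pvPfa, h s, hs', Bool.false_eq_true, if_false]
      congr 1
      apply ih
      intro u
      rw [List.any_append, List.any_append, h u]

-- the dict lemmas A's loops need
lemma pvInsert_insert {ν : Type} (d : PySem.Dict (Int × Int) ν) (k : Int × Int)
    (v w : ν) : (d.insert k v).insert k w = d.insert k w := by
  by_cases hc : d.contains k = true
  · have e1 : d.insert k v = PySem.Dict.mk (d.items.map (fun p => if (p.1 == k) = true then (k, v) else p)) := by
      unfold PySem.Dict.insert; rw [if_pos hc]
    have hcont : (PySem.Dict.mk (d.items.map (fun p => if (p.1 == k) = true then (k, v) else p)) : PySem.Dict (Int × Int) ν).contains k = true := by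
      rw [← e1, PySem.Dict.contains_insert]; simp
    rw [e1]
    unfold PySem.Dict.insert
    rw [if_pos hcont, if_pos hc]
    simp only [List.map_map]
    congr 1
    apply List.map_congr_left
    intro p _
    by_cases hp : p.1 = k <;> simp [hp]
  · have e1 : d.insert k v = PySem.Dict.mk (d.items ++ [(k, v)]) := by
      unfold PySem.Dict.insert; rw [if_neg hc]
    have hcont : (PySem.Dict.mk (d.items ++ [(k, v)]) : PySem.Dict (Int × Int) ν).contains k = true := by
      rw [← e1, PySem.Dict.contains_insert]; simp
    have hall : ∀ p ∈ d.items, (p.1 == k) = false := by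
      have hc' : d.items.any (fun p => p.1 == k) = false := eq_false_of_ne_true hc
      rw [List.any_eq_false] at hc'
      intro p hp
      exact eq_false_of_ne_true (hc' p hp)
    rw [e1]
    unfold PySem.Dict.insert
    rw [if_pos hcont, if_neg hc]
    simp only [List.map_append, List.map_cons, List.map_nil, beq_self_eq_true, if_true]
    congr 1
    conv_rhs => rw [← List.map_id d.items]
    congr 1
    apply List.map_congr_left
    intro p hp
    have hne : ¬ p.1 = k := by
      intro h
      exact absurd (by simp [h] : (p.1 == k) = true) (by simp [hall p hp])
    simp [hne]

-- membership in the items of an insert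
lemma pvMem_items_insert {ν : Type} {d : PySem.Dict (Int × Int) ν}
    {k : Int × Int} {v : ν} {p : (Int × Int) × ν}
    (h : p ∈ (d.insert k v).items) : p ∈ d.items ∨ p = (k, v) := by
  unfold PySem.Dict.insert at h
  by_cases hc : d.contains k = true
  · rw [if_pos hc] at h
    simp only [List.mem_map] at h
    obtain ⟨q, hq, he⟩ := h
    by_cases hk : q.1 = k
    · right; rw [← he]; simp [hk]
    · left; rw [← he]; simp [hk]; exact hq
  · rw [if_neg hc] at h
    simp only [List.mem_append, List.mem_cons] at h
    rcases h with h | h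
    · left; exact h
    · right; simpa using h

lemma pvKeys_insert {ν : Type} (d : PySem.Dict (Int × Int) ν) (k : Int × Int) (v : ν) :
    (d.insert k v).items.map Prod.fst = if d.contains k then d.items.map Prod.fst else d.items.map Prod.fst ++ [k] := by
  unfold PySem.Dict.insert
  by_cases hc : d.contains k = true
  · rw [if_pos hc, if_pos hc]
    simp only [List.map_map]
    apply List.map_congr_left
    intro p _
    by_cases hp : p.1 = k <;> simp [hp]
  · rw [if_neg hc, if_neg hc]
    simp

lemma pvNot_contains_get? {ν : Type} (d : PySem.Dict (Int × Int) ν) (k : Int × Int)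
    (hc : d.contains k = false) : d.get? k = none := by
  rw [PySem.Dict.contains_eq_isSome_get?] at hc
  cases h : d.get? k with
  | none => rfl
  | some v => rw [h] at hc; simp at hc

lemma pvNot_contains_keys {ν : Type} (d : PySem.Dict (Int × Int) ν) (k : Int × Int)
    (hc : d.contains k = false) : k ∉ d.items.map Prod.fst := by
  have hc' : d.items.any (fun p => p.1 == k) = false := hc
  rw [List.any_eq_false] at hc'
  intro hmem
  rw [List.mem_map] at hmem
  obtain ⟨p, hp, he⟩ := hmem
  exact absurd (by simp [he] : (p.1 == k) = true) (by simp [hc' p hp])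

-- A's inner loop over ys, started after dir has been given value acc
lemma pvInner (ys : List (List (Int × Int))) :
    ∀ (d : PySem.Dict (Int × Int) (List (List (Int × Int)))) (dir : Int × Int) (acc : List (List (Int × Int))),
    ys.foldl (fun out sc =>
        if out.contains dir then
          if (PySem.Dict.getD out dir []).any (fun t => PySem.Set.issubset sc t) then out
          else PySem.Dict.modify out dir [] (fun l => l ++ [sc])
        else PySem.Dict.insert out dir [sc]) (d.insert dir acc)
      = d.insert dir (pvGre acc ys) := by
  induction ys with
  | nil => intro d dir acc; simp [pvGre]
  | cons s r ih =>
    intro d dir acc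
    have hcont : (d.insert dir acc).contains dir = true := by
      rw [PySem.Dict.contains_insert]; simp
    have hgetD : PySem.Dict.getD (d.insert dir acc) dir [] = acc := by
      unfold PySem.Dict.getD; rw [PySem.Dict.get?_insert_self]; rfl
    rw [List.foldl_cons, if_pos hcont, hgetD]
    by_cases hany : acc.any (fun t => PySem.Set.issubset s t) = true
    · rw [if_pos hany, ih]
      congr 1
      simp [pvGre, hany]
    · rw [if_neg hany]
      rw [show PySem.Dict.modify (d.insert dir acc) dir [] (fun l => l ++ [s])
            = (d.insert dir acc).insert dir (acc ++ [s]) from by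
        unfold PySem.Dict.modify; rw [hgetD]]
      rw [pvInsert_insert, ih]
      congr 1
      simp [pvGre, hany]

-- the two grouping loops compute the same dict
lemma pvGroup_eq (edges : List ((Int × Int) × (List (Int × Int)))) :
    edges.foldl (fun d e =>
      if d.contains e.1 then PySem.Dict.modify d e.1 [] (fun l => l ++ [e.2])
      else PySem.Dict.insert d e.1 [e.2]) PySem.Dict.empty
    = edges.foldl (fun d e => PySem.Dict.modify d e.1 [] (fun l => l ++ [e.2])) PySem.Dict.empty := by
  have hfg : (fun (d : PySem.Dict (Int × Int) (List (List (Int × Int)))) (e : (Int × Int) × (List (Int × Int))) =>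
      if d.contains e.1 then PySem.Dict.modify d e.1 [] (fun l => l ++ [e.2])
      else PySem.Dict.insert d e.1 [e.2])
      = (fun d e => PySem.Dict.modify d e.1 [] (fun l => l ++ [e.2])) := by
    funext d e
    by_cases hc : d.contains e.1 = true
    · rw [if_pos hc]
    · rw [if_neg hc]
      unfold PySem.Dict.modify PySem.Dict.getD
      rw [pvNot_contains_get? d e.1 (eq_false_of_ne_true hc)]
      rfl
  rw [hfg]

-- invariants of the grouped dict: nonempty values, distinct keys
lemma pvGroup_inv_aux (edges : List ((Int × Int) × (List (Int × Int)))) :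
    ∀ (d : PySem.Dict (Int × Int) (List (List (Int × Int)))),
    (∀ p ∈ d.items, p.2 ≠ []) → (d.items.map Prod.fst).Nodup →
    (∀ p ∈ (edges.foldl (fun d e => PySem.Dict.modify d e.1 [] (fun l => l ++ [e.2])) d).items, p.2 ≠ ([] : List (List (Int × Int)))) ∧
    ((edges.foldl (fun d e => PySem.Dict.modify d e.1 [] (fun l => l ++ [e.2])) d).items.map Prod.fst).Nodup := by
  induction edges with
  | nil => intro d h1 h2; exact ⟨h1, h2⟩
  | cons e r ih =>
    intro d h1 h2
    rw [List.foldl_cons]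
    apply ih
    · intro p hp
      unfold PySem.Dict.modify at hp
      rcases pvMem_items_insert hp with h | h
      · exact h1 p h
      · rw [h]; simp
    · unfold PySem.Dict.modify
      rw [pvKeys_insert]
      by_cases hc : d.contains e.1 = true
      · rw [if_pos hc]; exact h2
      · rw [if_neg hc]
        rw [List.nodup_append]
        refine ⟨h2, List.nodup_singleton _, ?_⟩
        intro a ha b hb
        have hb' : b = e.1 := by simpa using hb
        rw [hb']
        intro he
        rw [he] at ha
        exact pvNot_contains_keys d e.1 (eq_false_of_ne_true hc) ha

-- ===== the per-direction value: B's pairwise filter + final sort = A's greedy on the sorted list =====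

-- abbreviations used by the sort lemmas
def pvBefP (a b : Int × List (Int × Int)) : Bool :=
  decide (PySem.Set.len b.2 < PySem.Set.len a.2)

-- strict 'sorted by (-len, index)' relation
def pvR (a b : Int × List (Int × Int)) : Prop :=
  PySem.Set.len b.2 < PySem.Set.len a.2 ∨
    (PySem.Set.len a.2 = PySem.Set.len b.2 ∧ a.1 < b.1)

-- the one-step unfolding of insertBy on a cons
lemma pvInsertBy_cons {α : Type} (before : α → α → Bool) (x y : α) (ys : List α) :
    PySem.List.insertBy before x (y :: ys)
    = if before x y = true then x :: y :: ys else y :: PySem.List.insertBy before x ys := rfl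

-- sorting the snd-projections = projecting the pair-sort (stability transported through map)
lemma pvInsertBy_map (x : Int × List (Int × Int)) (acc : List (Int × List (Int × Int))) :
    PySem.List.insertBy (fun a b => decide (PySem.Set.len b < PySem.Set.len a)) x.2
      (acc.map (fun q => q.2))
    = (PySem.List.insertBy pvBefP x acc).map (fun q => q.2) := by
  induction acc with
  | nil => rfl
  | cons y ys ih =>
    rw [List.map_cons, pvInsertBy_cons, pvInsertBy_cons]
    by_cases h : PySem.Set.len y.2 < PySem.Set.len x.2
    · rw [if_pos (decide_eq_true h : decide (PySem.Set.len y.2 < PySem.Set.len x.2) = true),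
          if_pos (show pvBefP x y = true from decide_eq_true h), List.map_cons, List.map_cons]
    · rw [if_neg (by simp only [decide_eq_true_eq]; exact h),
          if_neg (show ¬ pvBefP x y = true from by unfold pvBefP; simp only [decide_eq_true_eq]; exact h),
          List.map_cons, ih]
lemma pvSorted_map (l : List (Int × List (Int × Int))) :
    PySem.List.sorted (l.map (fun q => q.2)) (fun x => PySem.Set.len x) true
    = (PySem.List.sorted l (fun q => PySem.Set.len q.2) true).map (fun q => q.2) := by
  rw [PySem.List.sorted_rev_eq_foldl_insertBy, PySem.List.sorted_rev_eq_foldl_insertBy,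
      List.foldl_map]
  have : ∀ (acc : List (Int × List (Int × Int))),
      l.foldl (fun acc x => PySem.List.insertBy (fun a b => decide (PySem.Set.len b < PySem.Set.len a)) x.2 acc)
        (acc.map (fun q => q.2))
      = (l.foldl (fun acc x => PySem.List.insertBy (fun a b => decide (PySem.Set.len b.2 < PySem.Set.len a.2)) x acc) acc).map (fun q => q.2) := by
    induction l with
    | nil => intro acc; rfl
    | cons x xs ih =>
      intro acc
      rw [List.foldl_cons, List.foldl_cons, pvInsertBy_map]
      exact ih _
  simpa using this []

lemma pvInsertBy_all_before (x : Int × List (Int × Int)) (zs : List (Int × List (Int × Int)))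
    (h : ∀ z ∈ zs, pvBefP x z = true) :
    PySem.List.insertBy pvBefP x zs = x :: zs := by
  cases zs with
  | nil => rfl
  | cons z zs => rw [pvInsertBy_cons, if_pos (h z (by simp))]

-- filtering commutes with one stable insertion into a key-nonincreasing list
lemma pvFilter_insertBy (p : Int × List (Int × Int) → Bool) (x : Int × List (Int × Int))
    (ys : List (Int × List (Int × Int)))
    (hs : ys.Pairwise (fun a b => PySem.Set.len b.2 ≤ PySem.Set.len a.2)) :
    (PySem.List.insertBy pvBefP x ys).filter p
    = if p x then PySem.List.insertBy pvBefP x (ys.filter p) else ys.filter p := by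
  induction ys with
  | nil =>
    by_cases hx : p x = true <;> simp [PySem.List.insertBy, hx]
  | cons y ys ih =>
    rw [List.pairwise_cons] at hs
    obtain ⟨hy, hys⟩ := hs
    by_cases hb : PySem.Set.len y.2 < PySem.Set.len x.2
    · have hbx : pvBefP x y = true := by unfold pvBefP; exact decide_eq_true hb
      rw [pvInsertBy_cons, if_pos hbx]
      by_cases hx : p x = true
      · rw [if_pos hx, List.filter_cons_of_pos hx]
        have hall : PySem.List.insertBy pvBefP x ((y :: ys).filter p) = x :: (y :: ys).filter p := by
          apply pvInsertBy_all_before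
          intro z hz
          rw [List.mem_filter] at hz
          rcases List.mem_cons.mp hz.1 with h | h
          · rw [h]; exact hbx
          · unfold pvBefP
            exact decide_eq_true (lt_of_le_of_lt (hy z h) hb)
        rw [hall]
      · rw [if_neg hx, List.filter_cons_of_neg (by simp [hx])]
    · have hbx : pvBefP x y = false := by unfold pvBefP; exact decide_eq_false hb
      rw [pvInsertBy_cons, if_neg (by simp [hbx])]
      by_cases hpy : p y = true
      · rw [List.filter_cons_of_pos hpy, List.filter_cons_of_pos hpy, ih hys]
        by_cases hx : p x = true
        · rw [if_pos hx, if_pos hx, pvInsertBy_cons, if_neg (by simp [hbx])]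
        · rw [if_neg hx, if_neg hx]
      · rw [List.filter_cons_of_neg (by simp [hpy]), List.filter_cons_of_neg (by simp [hpy]), ih hys]

lemma pvSorted_append_singleton (ys : List (Int × List (Int × Int))) (x : Int × List (Int × Int)) :
    PySem.List.sorted (ys ++ [x]) (fun q => PySem.Set.len q.2) true
    = PySem.List.insertBy pvBefP x (PySem.List.sorted ys (fun q => PySem.Set.len q.2) true) := by
  rw [PySem.List.sorted_rev_eq_foldl_insertBy, PySem.List.sorted_rev_eq_foldl_insertBy,
      List.foldl_append]
  rfl

-- filtering commutes with the whole stable sort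
lemma pvSorted_filter (p : Int × List (Int × Int) → Bool) (l : List (Int × List (Int × Int))) :
    PySem.List.sorted (l.filter p) (fun q => PySem.Set.len q.2) true
    = (PySem.List.sorted l (fun q => PySem.Set.len q.2) true).filter p := by
  induction l using List.reverseRecOn with
  | nil => rfl
  | append_singleton l' x ih =>
    rw [List.filter_append, pvSorted_append_singleton,
        pvFilter_insertBy p x _ (PySem.List.sorted_pairwise_rev l' (fun q => PySem.Set.len q.2))]
    by_cases hx : p x = true
    · rw [if_pos hx]
      have : (l'.filter p ++ [x].filter p) = l'.filter p ++ [x] := by simp [hx]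
      rw [this, pvSorted_append_singleton, ih]
    · rw [if_neg hx]
      have : (l'.filter p ++ [x].filter p) = l'.filter p := by simp [hx]
      rw [this, ih]

-- inserting an element whose index exceeds every index present preserves the strict lex order
lemma pvInsertBy_pairwise_lex (x : Int × List (Int × Int)) (acc : List (Int × List (Int × Int)))
    (hacc : acc.Pairwise pvR) (hidx : ∀ a ∈ acc, a.1 < x.1) :
    (PySem.List.insertBy pvBefP x acc).Pairwise pvR := by
  induction acc with
  | nil => simp [PySem.List.insertBy]
  | cons y ys ih =>
    rw [List.pairwise_cons] at hacc
    obtain ⟨hy, hys⟩ := hacc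
    by_cases hb : PySem.Set.len y.2 < PySem.Set.len x.2
    · rw [pvInsertBy_cons, if_pos (show pvBefP x y = true from decide_eq_true hb)]
      rw [List.pairwise_cons]
      constructor
      · intro z hz
        rcases List.mem_cons.mp hz with h | h
        · rw [h]; exact Or.inl hb
        · refine Or.inl ?_
          rcases hy z h with h' | h'
          · exact lt_trans h' hb
          · exact h'.1 ▸ hb
      · exact List.pairwise_cons.mpr ⟨hy, hys⟩
    · rw [pvInsertBy_cons, if_neg (show ¬ pvBefP x y = true from by unfold pvBefP; simp only [decide_eq_true_eq]; exact hb)]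
      rw [List.pairwise_cons]
      constructor
      · intro z hz
        rcases (PySem.List.mem_insertBy _ _ _ _).mp hz with h | h
        · rw [h]
          rcases lt_or_eq_of_le (le_of_not_gt hb) with h' | h'
          · exact Or.inl h'
          · exact Or.inr ⟨h'.symm, hidx y (by simp)⟩
        · exact hy z h
      · exact ih hys (fun a ha => hidx a (by simp [ha]))

-- the sorted enumeration is strictly ordered by (-len, original index)
lemma pvSorted_lex (l : List (Int × List (Int × Int))) (hl : l.Pairwise (fun a b => a.1 < b.1)) :
    (PySem.List.sorted l (fun q => PySem.Set.len q.2) true).Pairwise pvR := by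
  rw [PySem.List.sorted_rev_eq_foldl_insertBy]
  have hb : (fun (a b : Int × List (Int × Int)) => decide (PySem.Set.len b.2 < PySem.Set.len a.2)) = pvBefP := rfl
  rw [hb]
  have main : ∀ (l' : List (Int × List (Int × Int))) (acc : List (Int × List (Int × Int))),
      acc.Pairwise pvR → l'.Pairwise (fun a b => a.1 < b.1) →
      (∀ a ∈ acc, ∀ b ∈ l', a.1 < b.1) →
      (l'.foldl (fun acc x => PySem.List.insertBy pvBefP x acc) acc).Pairwise pvR := by
    intro l'
    induction l' with
    | nil => intro acc h _ _; exact h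
    | cons x xs ih =>
      intro acc hacc hl' hcross
      rw [List.pairwise_cons] at hl'
      rw [List.foldl_cons]
      apply ih
      · exact pvInsertBy_pairwise_lex x acc hacc (fun a ha => hcross a ha x (by simp))
      · exact hl'.2
      · intro a ha b hb
        rcases (PySem.List.mem_insertBy _ _ _ _).mp ha with h | h
        · rw [h]; exact hl'.1 b hb
        · exact hcross a h b (by simp [hb])
  exact main l [] (by simp) hl (by simp)

-- over a lex-sorted list with distinct indices, the global pairwise test collapses to
-- 'some element of the prefix is a superset'
lemma pvAny_bad_eq (F ctx rest' : List (Int × List (Int × Int))) (q : Int × List (Int × Int))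
    (hF : F = ctx ++ q :: rest') (hR : F.Pairwise pvR) (hN : (F.map Prod.fst).Nodup) :
    F.any (fun r => pvBad q r) = (ctx.map (fun c => c.2)).any (fun t => PySem.Set.issubset q.2 t) := by
  subst hF
  rcases h : (ctx.map (fun c => c.2)).any (fun t => PySem.Set.issubset q.2 t) with _ | _
  · -- no superset in the prefix: show no r anywhere satisfies pvBad q r
    rw [h, List.any_eq_false]
    intro r hr
    rw [List.any_eq_false] at h
    rcases List.mem_append.mp hr with hrc | hrq
    · -- r in the prefix: pvBad would give a superset there
      intro hb
      have hsub : PySem.Set.issubset q.2 r.2 = true := by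
        simp only [pvBad, Bool.and_eq_true] at hb
        exact hb.1.2
      exact absurd hsub (by simpa using h r.2 (List.mem_map.mpr ⟨r, hrc, rfl⟩))
    · rcases List.mem_cons.mp hrq with hq | hrr
      · -- r = q: the index test j != i fails
        intro hb
        rw [hq] at hb
        simp [pvBad] at hb
      · -- r after q: the lex order contradicts pvBad's length/index condition
        intro hb
        have hqr : pvR q r := by
          have := (List.pairwise_append.mp hR).2.1
          rw [List.pairwise_cons] at this
          exact this.1 r hrr
        simp only [pvBad, Bool.and_eq_true, Bool.or_eq_true, Bool.and_eq_true,
          decide_eq_true_iff, beq_iff_eq] at hb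
        rcases hb.2 with h1 | h2
        · rcases hqr with h' | h'
          · omega
          · omega
        · rcases hqr with h' | h'
          · omega
          · omega
  · -- a superset c in the prefix: pvBad q c holds
    rw [h, List.any_eq_true]
    rw [List.any_eq_true] at h
    obtain ⟨t, ht, hsub⟩ := h
    rw [List.mem_map] at ht
    obtain ⟨c, hc, hct⟩ := ht
    refine ⟨c, List.mem_append.mpr (Or.inl hc), ?_⟩
    have hcq : pvR c q := by
      have := (List.pairwise_append.mp hR).2.2
      exact this c hc q (by simp)
    have hne : c.1 ≠ q.1 := by
      intro he
      have hd := (List.nodup_append.mp (by simpa using hN)).2.2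
      exact hd c.1 (List.mem_map.mpr ⟨c, hc, rfl⟩) q.1 (by simp) he
    simp only [pvBad, Bool.and_eq_true, Bool.or_eq_true, decide_eq_true_iff, beq_iff_eq,
      bne_iff_ne, ne_eq]
    refine ⟨⟨hne, hct ▸ hsub⟩, ?_⟩
    rcases hcq with h' | h'
    · exact Or.inl h'
    · exact Or.inr ⟨h'.1, h'.2⟩

-- the pairwise filter over the sorted enumeration, projected to sets, is the prefix filter
lemma pvMain (rest : List (Int × List (Int × Int))) :
    ∀ (ctx F : List (Int × List (Int × Int))),
    F = ctx ++ rest → F.Pairwise pvR → (F.map Prod.fst).Nodup →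
    ((rest.filter (fun q => !(F.any (fun r => pvBad q r)))).map (fun q => q.2))
      = pvPfa (ctx.map (fun c => c.2)) (rest.map (fun c => c.2)) := by
  induction rest with
  | nil => intro ctx F _ _ _; simp [pvPfa]
  | cons q rest' ih =>
    intro ctx F hF hR hN
    have hq := pvAny_bad_eq F ctx rest' q hF hR hN
    have hctx' : F = (ctx ++ [q]) ++ rest' := by rw [hF]; simp
    rw [List.map_cons]
    rcases hcase : (ctx.map (fun c => c.2)).any (fun t => PySem.Set.issubset q.2 t) with _ | _
    · rw [List.filter_cons_of_pos (by rw [hq, hcase]; rfl)]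
      rw [List.map_cons]
      have := ih (ctx ++ [q]) F hctx' hR hN
      rw [show pvPfa (ctx.map (fun c => c.2)) (q.2 :: rest'.map (fun c => c.2))
            = q.2 :: pvPfa (ctx.map (fun c => c.2) ++ [q.2]) (rest'.map (fun c => c.2)) from by
        simp [pvPfa, hcase]]
      rw [show (ctx ++ [q]).map (fun c => c.2) = ctx.map (fun c => c.2) ++ [q.2] from by simp] at this
      rw [this]
    · rw [List.filter_cons_of_neg (by rw [hq, hcase]; simp)]
      have := ih (ctx ++ [q]) F hctx' hR hN
      rw [show pvPfa (ctx.map (fun c => c.2)) (q.2 :: rest'.map (fun c => c.2))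
            = pvPfa (ctx.map (fun c => c.2) ++ [q.2]) (rest'.map (fun c => c.2)) from by
        simp [pvPfa, hcase]]
      rw [show (ctx ++ [q]).map (fun c => c.2) = ctx.map (fun c => c.2) ++ [q.2] from by simp] at this
      rw [this]

-- the per-direction value computed by B equals A's greedy result
lemma pvVal (g : List (List (Int × Int))) :
    PySem.List.sorted
      ((PySem.List.enumerate g).foldl (fun acc q =>
          if (PySem.List.enumerate g).any (fun r => pvBad q r) then acc else acc ++ [q.2]) [])
      (fun x => PySem.Set.len x) true
    = pvGre [] (PySem.List.sorted g (fun x => PySem.Set.len x) true) := by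
  have hstep : ((PySem.List.enumerate g (0 : Int)).foldl (fun acc q =>
      if (PySem.List.enumerate g (0 : Int)).any (fun r => pvBad q r) then acc else acc ++ [q.2]) [])
      = ((PySem.List.enumerate g (0 : Int)).filter
          (fun q => !((PySem.List.enumerate g (0 : Int)).any (fun r => pvBad q r)))).map (fun q => q.2) := by
    have hf : (fun (acc : List (List (Int × Int))) (q : Int × List (Int × Int)) =>
        if (PySem.List.enumerate g (0 : Int)).any (fun r => pvBad q r) then acc else acc ++ [q.2])
        = (fun acc q => if (!((PySem.List.enumerate g (0 : Int)).any (fun r => pvBad q r))) then acc ++ [q.2] else acc) := by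
      funext acc q
      rcases h : (PySem.List.enumerate g (0 : Int)).any (fun r => pvBad q r) with _ | _ <;> simp
    rw [hf, PySem.List.foldl_append_if]
    simp
  set E := PySem.List.sorted (PySem.List.enumerate g (0 : Int)) (fun q => PySem.Set.len q.2) true with hE
  have hperm : E.Perm (PySem.List.enumerate g (0 : Int)) := PySem.List.sorted_perm _ _ _
  have hlex : E.Pairwise pvR := pvSorted_lex _ (PySem.List.pairwise_lt_enumerate g 0)
  have hnodup0 : ((PySem.List.enumerate g (0 : Int)).map Prod.fst).Nodup := by
    have h1 := PySem.List.pairwise_lt_enumerate g (0 : Int)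
    have h2 : ((PySem.List.enumerate g (0 : Int)).map Prod.fst).Pairwise (· < ·) :=
      (List.pairwise_map).mpr h1
    exact h2.imp ne_of_lt
  have hnodup : (E.map Prod.fst).Nodup :=
    ((hperm.map Prod.fst).nodup_iff).mpr hnodup0
  rw [hstep, pvSorted_map, pvSorted_filter]
  have hfc : E.filter (fun q => !((PySem.List.enumerate g (0 : Int)).any (fun r => pvBad q r)))
      = E.filter (fun q => !(E.any (fun r => pvBad q r))) := by
    apply List.filter_congr
    intro q _
    rw [List.Perm.any_eq hperm]
  rw [hfc]
  rw [pvMain E [] E (by simp) hlex hnodup]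
  have hg : PySem.List.sorted g (fun x => PySem.Set.len x) true = E.map (fun q => q.2) := by
    conv_lhs => rw [← PySem.List.map_snd_enumerate g (0 : Int)]
    exact pvSorted_map _
  rw [hg, pvGre_eq, List.nil_append, pvPfk_eq_pfa _ [] [] (fun _ => rfl)]
  rfl

-- both outer loops agree on an items list with fresh, distinct keys and nonempty values
lemma pvOuter (items : List ((Int × Int) × List (List (Int × Int)))) :
    ∀ (out : PySem.Dict (Int × Int) (List (List (Int × Int)))),
    (∀ p ∈ items, p.2 ≠ []) → (∀ p ∈ items, out.contains p.1 = false) → (items.map Prod.fst).Nodup →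
    items.foldl (fun out p =>
      (PySem.List.sorted p.2 (fun x => PySem.Set.len x) true).foldl (fun out sc =>
        if out.contains p.1 then
          if (PySem.Dict.getD out p.1 []).any (fun t => PySem.Set.issubset sc t) then out
          else PySem.Dict.modify out p.1 [] (fun l => l ++ [sc])
        else PySem.Dict.insert out p.1 [sc]) out) out
    = items.foldl (fun out p =>
      let survivors := (PySem.List.enumerate p.2).foldl (fun acc q =>
          if (PySem.List.enumerate p.2).any (fun r => pvBad q r) then acc else acc ++ [q.2]) []
      PySem.Dict.insert out p.1 (PySem.List.sorted survivors (fun x => PySem.Set.len x) true)) out := by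
  induction items with
  | nil => intro out _ _ _; rfl
  | cons p rest ih =>
    intro out h1 h2 h3
    have hne : p.2 ≠ [] := h1 p (by simp)
    have hsrtne : PySem.List.sorted p.2 (fun x => PySem.Set.len x) true ≠ [] := by
      rw [Ne, PySem.List.sorted_eq_nil_iff]
      exact hne
    obtain ⟨s, r, hsr⟩ : ∃ s r, PySem.List.sorted p.2 (fun x => PySem.Set.len x) true = s :: r := by
      cases h : PySem.List.sorted p.2 (fun x => PySem.Set.len x) true with
      | nil => exact absurd h hsrtne
      | cons s r => exact ⟨s, r, rfl⟩
    have hcout : out.contains p.1 = false := h2 p (by simp)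
    -- one step of A's outer loop
    have hstepA : (PySem.List.sorted p.2 (fun x => PySem.Set.len x) true).foldl (fun out sc =>
        if out.contains p.1 then
          if (PySem.Dict.getD out p.1 []).any (fun t => PySem.Set.issubset sc t) then out
          else PySem.Dict.modify out p.1 [] (fun l => l ++ [sc])
        else PySem.Dict.insert out p.1 [sc]) out
        = out.insert p.1 (pvGre [] (PySem.List.sorted p.2 (fun x => PySem.Set.len x) true)) := by
      rw [hsr, List.foldl_cons, if_neg (by rw [hcout]; simp), pvInner]
      congr 1
    rw [List.foldl_cons, List.foldl_cons, hstepA]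
    simp only []
    rw [← pvVal p.2]
    apply ih
    · intro q hq; exact h1 q (by simp [hq])
    · intro q hq
      rw [PySem.Dict.contains_insert]
      have hq1 : q.1 ≠ p.1 := by
        intro he
        rw [List.map_cons, List.nodup_cons] at h3
        exact h3.1 (he ▸ (List.mem_map.mpr ⟨q, hq, rfl⟩))
      rw [h2 q (by simp [hq])]
      simp [hq1]
    · rw [List.map_cons, List.nodup_cons] at h3
      exact h3.2

-- ===== VERDICT (by name: the statement is the Claim_ definition above) =====
theorem deduplicate_edges_spec : Claim_equal_deduplicate_edges := by
  intro edges _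
  unfold Spec_deduplicate_edges deduplicate_edges deduplicate_edges_alt
  simp only []
  rw [pvGroup_eq]
  obtain ⟨h1, h2⟩ := pvGroup_inv_aux edges PySem.Dict.empty (by simp [PySem.Dict.empty]) (by simp [PySem.Dict.empty])
  rw [pvOuter _ PySem.Dict.empty h1 (fun p _ => rfl) h2]
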